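-- pv_equiv track=rewrite | github.com/LeiLeiiiii/image-ecm | back/cloud-model/sunyard-framework/sunyard-img/src/main/java/com/sunyard/framework/img/util/python/ImgUtils.py | find_subarrays_positions
-- ===== SOURCE A (Python) =====
-- def find_subarrays_positions(main_array, subarrays,box):
--     positions = {}
--     for subarray in subarrays:
--         subarray_tuple = tuple(subarray)  # 将子数组转换为元组，以便用作字典键
--         # 使用循环来找到子数组在 main_array 中的起始位置
--         for i in range(len(main_array) - len(subarray) + 1):
--             if main_array[i:i + len(subarray)] == subarray:
--                 start_pos = i
--                 end_pos = i + len(subarray) - 1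
--                 positions[subarray_tuple] = (start_pos, end_pos)
--                 break  # 找到第一个匹配项后就跳出循环
--
--     differences = []
--     # 打印结果
--     for subarray, (start, end) in positions.items():
--         while start<end:
--             differences.append(box[start])
--             start = start+1
--     return differences
-- ===== SOURCE B (Python) =====
-- def find_subarrays_positions(main_array, subarrays, box):
--     # Index positions of each value once, then per distinct subarray only probe
--     # candidate starts where the first element matches.
--     occ = {}
--     for i, v in enumerate(main_array):
--         occ.setdefault(v, []).append(i)
--     result = []
--     seen = set()
--     for sub in subarrays:
--         key = tuple(sub)
--         if key in seen:
--             continue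
--         seen.add(key)
--         if sub:
--             m = len(sub)
--             for i in occ.get(sub[0], []):
--                 if main_array[i:i + m] == sub:
--                     result.extend(box[i:i + m - 1])
--                     break
--     return result
-- ===== Notes on version B (the rewrite author's own statement) =====
-- stated objective: faster
-- what changed: B builds a value-to-positions index of main_array once and probes only candidate starts whose first element matches (instead of A's scan of every start position per subarray), with a seen-set replacing A's dict-then-replay second phase and box slices replacing the index-by-index while loop.
import Mathlib
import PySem

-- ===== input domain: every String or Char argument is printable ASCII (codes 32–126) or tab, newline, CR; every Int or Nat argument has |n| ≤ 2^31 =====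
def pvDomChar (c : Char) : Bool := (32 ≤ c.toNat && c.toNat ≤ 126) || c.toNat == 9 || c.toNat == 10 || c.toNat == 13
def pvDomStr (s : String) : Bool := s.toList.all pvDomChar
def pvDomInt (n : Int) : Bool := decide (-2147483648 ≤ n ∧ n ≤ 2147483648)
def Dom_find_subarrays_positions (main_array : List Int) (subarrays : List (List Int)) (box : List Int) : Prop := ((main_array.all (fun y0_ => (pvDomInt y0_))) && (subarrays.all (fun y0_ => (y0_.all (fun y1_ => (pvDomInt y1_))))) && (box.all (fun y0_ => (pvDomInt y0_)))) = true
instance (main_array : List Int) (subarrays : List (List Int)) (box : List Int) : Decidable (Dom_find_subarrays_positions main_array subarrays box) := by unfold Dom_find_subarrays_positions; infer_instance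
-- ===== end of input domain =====

-- B replaces A's scan of every start position by a value→positions index of main_array
-- probed only at candidate starts, a seen-set instead of A's dict-then-replay second
-- phase, and box slices instead of the index-by-index while loop (objective: faster,
-- measured).

-- ===== PORT A =====
-- 'for i in range(len(main_array)-len(subarray)+1): if main_array[i:i+len(subarray)]==subarray: …; break'
def pvSearchA (main sub : List Int) : List Int → Option (Int × Int)
  | [] => none
  | i :: rest =>
    if PySem.List.slice main (some i) (some (i + (sub.length : Int))) == sub then
      some (i, i + (sub.length : Int) - 1)
    else pvSearchA main sub rest

-- 'while start < end: differences.append(box[start]); start += 1'  (box[start] exact under Pre_)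
def pvWhileA (box : List Int) (s e : Int) : List Int :=
  if _h : s < e then PySem.List.pyGetD box s 0 :: pvWhileA box (s + 1) e else []
  termination_by (e - s).toNat
  decreasing_by omega

def pvStepA (main : List Int) (d : PySem.Dict (List Int) (Int × Int)) (sub : List Int) :
    PySem.Dict (List Int) (Int × Int) :=
  match pvSearchA main sub (PySem.List.pyRange 0 ((main.length : Int) - (sub.length : Int) + 1)) with
  | some p => d.insert sub p
  | none => d

def find_subarrays_positions (main_array : List Int) (subarrays : List (List Int)) (box : List Int) : List Int :=
  let positions := subarrays.foldl (pvStepA main_array) PySem.Dict.empty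
  positions.items.foldl (fun diffs p => diffs ++ pvWhileA box p.2.1 p.2.2) []

-- ===== PORT B =====
-- 'occ.setdefault(v, []).append(i)' over enumerate(main_array)
def pvOccB (main : List Int) : PySem.Dict Int (List Int) :=
  (PySem.List.enumerate main 0).foldl (fun d p => d.modify p.2 [] (fun l => l ++ [p.1])) PySem.Dict.empty

-- 'for i in occ.get(sub[0], []): if main_array[i:i+m] == sub: result.extend(box[i:i+m-1]); break'
def pvScanB (main sub box : List Int) : List Int → List Int
  | [] => []
  | i :: rest =>
    if PySem.List.slice main (some i) (some (i + (sub.length : Int))) == sub then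
      PySem.List.slice box (some i) (some (i + (sub.length : Int) - 1))
    else pvScanB main sub box rest

def pvStepB (main box : List Int) (occ : PySem.Dict Int (List Int))
    (st : PySem.Set (List Int) × List Int) (sub : List Int) : PySem.Set (List Int) × List Int :=
  if PySem.Set.contains st.1 sub then st
  else
    match sub with
    | [] => (PySem.Set.add st.1 sub, st.2)
    | v :: _ => (PySem.Set.add st.1 sub, st.2 ++ pvScanB main sub box (occ.getD v []))

def find_subarrays_positions_alt (main_array : List Int) (subarrays : List (List Int)) (box : List Int) : List Int :=
  let occ := pvOccB main_array
  (subarrays.foldl (pvStepB main_array box occ) (PySem.Set.empty, [])).2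

-- ===== PRECONDITION & SPEC =====
-- Pre_ excludes exactly the inputs on which A raises IndexError on box: some subarray of
-- length ≥ 2 whose first occurrence in main_array starts at i with i + len(sub) - 1 > len(box).
def Pre_find_subarrays_positions (main_array : List Int) (subarrays : List (List Int)) (box : List Int) : Prop :=
  ∀ sub ∈ subarrays, 2 ≤ sub.length →
    ∀ i : Nat, i < main_array.length →
      (PySem.List.slice main_array (some (i : Int)) (some ((i : Int) + (sub.length : Int))) = sub ∧
       ∀ j : Nat, j < i →
         PySem.List.slice main_array (some (j : Int)) (some ((j : Int) + (sub.length : Int))) ≠ sub) →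
      (i : Int) + (sub.length : Int) ≤ (box.length : Int) + 1
instance (main_array : List Int) (subarrays : List (List Int)) (box : List Int) : Decidable (Pre_find_subarrays_positions main_array subarrays box) := by unfold Pre_find_subarrays_positions; infer_instance

def pvWitness_find_subarrays_positions : List Int × List (List Int) × List Int :=
  ([1, 2, 3], [[2, 3]], [7, 8, 9])

def Spec_find_subarrays_positions (main_array : List Int) (subarrays : List (List Int)) (box : List Int) (out : List Int) : Prop := out = find_subarrays_positions_alt main_array subarrays box
instance (main_array : List Int) (subarrays : List (List Int)) (box : List Int) (out : List Int) : Decidable (Spec_find_subarrays_positions main_array subarrays box out) := by unfold Spec_find_subarrays_positions; infer_instance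

-- ===== CLAIM (what is proved, stated in full; the proofs are below) =====
def Claim_equal_find_subarrays_positions : Prop := ∀ (main_array : List Int) (subarrays : List (List Int)) (box : List Int), Dom_find_subarrays_positions main_array subarrays box → Pre_find_subarrays_positions main_array subarrays box → Spec_find_subarrays_positions main_array subarrays box (find_subarrays_positions main_array subarrays box)

-- ===== LEMMAS AND PROOFS =====

-- whether a subarray matches main at start i (the slice test both ports perform)
def pvMatched (main sub : List Int) (i : Int) : Bool :=
  PySem.List.slice main (some i) (some (i + (sub.length : Int))) == sub

-- A's inner search, characterised by the first matched candidate
theorem searchA_char (main sub : List Int) (cs : List Int) :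
    pvSearchA main sub cs =
      (cs.filter (pvMatched main sub)).head?.map (fun i => (i, i + (sub.length : Int) - 1)) := by
  induction cs with
  | nil => rfl
  | cons i rest ih =>
    simp only [pvSearchA, List.filter_cons, pvMatched]
    by_cases h : (PySem.List.slice main (some i) (some (i + (sub.length : Int))) == sub) = true
    · simp [h]
    · simp [h, ih]

-- B's inner scan, characterised the same way
theorem scanB_char (main sub box : List Int) (cs : List Int) :
    pvScanB main sub box cs =
      match (cs.filter (pvMatched main sub)).head? with
      | some i => PySem.List.slice box (some i) (some (i + (sub.length : Int) - 1))
      | none => [] := by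
  induction cs with
  | nil => rfl
  | cons i rest ih =>
    simp only [pvScanB, List.filter_cons, pvMatched]
    by_cases h : (PySem.List.slice main (some i) (some (i + (sub.length : Int))) == sub) = true
    · simp [h]
    · simp [h, ih]

-- a match at i (0 ≤ i) pins down the window and the first element
theorem matched_facts (main : List Int) (v : Int) (tl : List Int) {i : Int} (h0 : 0 ≤ i)
    (hm : pvMatched main (v :: tl) i = true) :
    i + ((v :: tl).length : Int) ≤ (main.length : Int) ∧ main[i.toNat]? = some v := by
  unfold pvMatched at hm
  rw [beq_iff_eq] at hm
  rw [PySem.List.slice_toNat main h0 (by omega)] at hm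
  rw [show (i + ((v :: tl).length : Int)).toNat - i.toNat = (v :: tl).length by omega] at hm
  constructor
  · have hlen := congrArg List.length hm
    simp only [List.length_take, List.length_drop, List.length_cons] at hlen
    simp only [List.length_cons]
    omega
  · have hh := congrArg (fun l => l[0]?) hm
    simp only [List.getElem?_take, List.getElem?_drop, List.length_cons] at hh
    simpa using hh

theorem sub_nil_matched (main : List Int) (i : Int) : pvMatched main [] i = true := by
  unfold pvMatched
  rw [beq_iff_eq]
  apply List.eq_nil_of_length_eq_zero
  rw [PySem.List.length_slice]
  simp

theorem occ_fold (l : List (Int × Int)) (d : PySem.Dict Int (List Int)) (v : Int) :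
    (l.foldl (fun d p => d.modify p.2 [] (fun t => t ++ [p.1])) d).getD v [] =
      d.getD v [] ++ (l.filter (fun p => p.2 == v)).map (fun p => p.1) := by
  induction l generalizing d with
  | nil => simp
  | cons p rest ih =>
    simp only [List.foldl_cons, List.filter_cons, ih]
    rw [PySem.Dict.getD_modify]
    by_cases h : p.2 = v
    · simp [h]
    · simp [h, Ne.symm h]

-- the two candidate lists filter down to the SAME list of matching starts
theorem cand_eq (main : List Int) (v : Int) (tl : List Int) :
    ((PySem.List.pyRange 0 ((main.length : Int) - ((v :: tl).length : Int) + 1)).filter (pvMatched main (v :: tl))) =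
    (((PySem.List.pyRange 0 (main.length : Int)).filter
        (fun j => PySem.List.pyGetD main j 0 == v)).filter (pvMatched main (v :: tl))) := by
  have pwL : ((PySem.List.pyRange 0 ((main.length : Int) - ((v :: tl).length : Int) + 1)).filter
      (pvMatched main (v :: tl))).Pairwise (· < ·) :=
    List.Pairwise.sublist List.filter_sublist (PySem.List.pairwise_lt_pyRange_one _ _)
  have pwR : ((((PySem.List.pyRange 0 (main.length : Int)).filter
      (fun j => PySem.List.pyGetD main j 0 == v)).filter (pvMatched main (v :: tl)))).Pairwise (· < ·) :=
    List.Pairwise.sublist (List.Sublist.trans List.filter_sublist List.filter_sublist)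
      (PySem.List.pairwise_lt_pyRange_one _ _)
  have hmem : ∀ a, a ∈ ((PySem.List.pyRange 0 ((main.length : Int) - ((v :: tl).length : Int) + 1)).filter
      (pvMatched main (v :: tl))) ↔ a ∈ ((((PySem.List.pyRange 0 (main.length : Int)).filter
      (fun j => PySem.List.pyGetD main j 0 == v)).filter (pvMatched main (v :: tl)))) := by
    intro a
    simp only [List.mem_filter, PySem.List.mem_pyRange_one]
    constructor
    · rintro ⟨⟨h0, h1⟩, hm⟩
      obtain ⟨hlen, hget⟩ := matched_facts main v tl h0 hm
      simp only [List.length_cons] at hlen h1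
      have halt : a < (main.length : Int) := by omega
      obtain ⟨hlt', he⟩ := List.getElem?_eq_some_iff.mp hget
      refine ⟨⟨⟨h0, halt⟩, ?_⟩, hm⟩
      rw [beq_iff_eq, PySem.List.pyGetD_eq_getElem main 0 h0 halt]
      exact he
    · rintro ⟨⟨⟨h0, _⟩, _⟩, hm⟩
      obtain ⟨hlen, _⟩ := matched_facts main v tl h0 hm
      simp only [List.length_cons] at hlen ⊢
      exact ⟨⟨h0, by omega⟩, hm⟩
  have ndL := pwL.imp (fun h => ne_of_lt h)
  have ndR := pwR.imp (fun h => ne_of_lt h)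
  have hperm := (List.perm_ext_iff_of_nodup ndR ndL).mpr (fun a => (hmem a).symm)
  have e1 := PySem.List.sorted_eq_of_perm_of_pairwise_lt _ _ (fun x : Int => x) hperm pwR
  have e2 := PySem.List.sorted_eq_of_perm_of_pairwise_lt _ _ (fun x : Int => x) (List.Perm.refl _) pwL
  exact e2.symm.trans e1

-- the occurrence index B builds: positions j with main[j] == v, in order
theorem occ_getD (main : List Int) (v : Int) :
    (pvOccB main).getD v [] =
      (PySem.List.pyRange 0 (main.length : Int)).filter
        (fun j => PySem.List.pyGetD main j 0 == v) := by
  unfold pvOccB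
  rw [occ_fold]
  rw [show PySem.List.enumerate main 0 =
      (PySem.List.pyRange 0 (PySem.List.len main)).map (fun j => (j, PySem.List.pyGetD main j 0)) from
      PySem.List.enumerate_eq_map_pyRange main 0]
  simp [List.filter_map, List.map_map, Function.comp_def, PySem.List.len]

-- head of a filtered <-sorted list is minimal among the list's satisfying elements
theorem head_filter_min {cs : List Int} {p : Int → Bool} {i : Int}
    (hs : cs.Pairwise (· < ·)) (hh : (cs.filter p).head? = some i) :
    i ∈ cs ∧ p i = true ∧ ∀ j ∈ cs, j < i → p j = false := by
  induction cs with
  | nil => simp at hh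
  | cons c rest ih =>
    rw [List.pairwise_cons] at hs
    by_cases hc : p c = true
    · rw [List.filter_cons_of_pos hc] at hh
      simp only [List.head?_cons, Option.some.injEq] at hh
      subst hh
      refine ⟨List.mem_cons_self, hc, ?_⟩
      intro j hj hji
      rcases List.mem_cons.mp hj with h | h
      · omega
      · exact absurd (hs.1 j h) (by omega)
    · rw [List.filter_cons_of_neg (by simpa using hc)] at hh
      obtain ⟨h1, h2, h3⟩ := ih hs.2 hh
      refine ⟨List.mem_cons_of_mem _ h1, h2, ?_⟩
      intro j hj hji
      rcases List.mem_cons.mp hj with h | h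
      · subst h; simpa using hc
      · exact h3 j h hji

theorem whileA_stop (box : List Int) (s e : Int) (h : ¬ s < e) : pvWhileA box s e = [] := by
  rw [pvWhileA]; simp [h]

-- the while loop over box equals the box slice, when the bounds are in range
theorem whileA_eq_slice (box : List Int) (s e : Int) (hs : 0 ≤ s) (hse : s ≤ e)
    (he : e ≤ (box.length : Int)) :
    pvWhileA box s e = PySem.List.slice box (some s) (some e) := by
  rw [PySem.List.slice_toNat box hs (le_trans hs hse)]
  have main : ∀ (k : Nat) (s : Int), 0 ≤ s → s ≤ e → k = (e - s).toNat →
      pvWhileA box s e = List.take k (List.drop s.toNat box) := by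
    intro k
    induction k with
    | zero =>
      intro s h0 h1 hk
      rw [whileA_stop box s e (by omega)]
      simp
    | succ n ih =>
      intro s h0 h1 hk
      have hlt : s < e := by omega
      rw [pvWhileA]
      simp only [hlt, dite_true]
      rw [ih (s + 1) (by omega) (by omega) (by omega)]
      rw [List.drop_eq_getElem_cons (show s.toNat < box.length by omega)]
      rw [List.take_succ_cons]
      congr 1
      · exact PySem.List.pyGetD_eq_getElem box 0 h0 (by omega)
      · congr 2
        omega
  exact main (e.toNat - s.toNat) s hs hse (by omega)

-- what A's search returns for a given sub ('g' of the invariant)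
def pvGA (main sub : List Int) : Option (Int × Int) :=
  pvSearchA main sub (PySem.List.pyRange 0 ((main.length : Int) - (sub.length : Int) + 1))

-- B's accumulator is only appended to
theorem foldB_acc (main box : List Int) (occ : PySem.Dict Int (List Int)) :
    ∀ (l : List (List Int)) (seen : PySem.Set (List Int)) (a b : List Int),
      (l.foldl (pvStepB main box occ) (seen, a ++ b)).2 = a ++ (l.foldl (pvStepB main box occ) (seen, b)).2 := by
  intro l
  induction l with
  | nil => intro seen a b; rfl
  | cons sub rest ih =>
    intro seen a b
    simp only [List.foldl_cons, pvStepB]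
    by_cases h : PySem.Set.contains seen sub = true
    · simp only [h, if_true]
      exact ih seen a b
    · simp only [h, if_false, Bool.false_eq_true]
      cases sub with
      | nil => exact ih _ a b
      | cons v tl =>
        simp only []
        rw [List.append_assoc]
        exact ih _ a _

-- the main loop invariant: A's dict-then-replay equals B's one-pass emission
theorem fold_eq (main box : List Int) :
    ∀ (l : List (List Int)) (d : PySem.Dict (List Int) (Int × Int)) (seen : PySem.Set (List Int)),
      (∀ sub ∈ l, 2 ≤ sub.length →
        ∀ i : Nat, i < main.length →
          (PySem.List.slice main (some (i : Int)) (some ((i : Int) + (sub.length : Int))) = sub ∧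
           ∀ j : Nat, j < i →
             PySem.List.slice main (some (j : Int)) (some ((j : Int) + (sub.length : Int))) ≠ sub) →
          (i : Int) + (sub.length : Int) ≤ (box.length : Int) + 1) →
      d.keys.Nodup →
      d.keys = seen.filter (fun s => (pvGA main s).isSome) →
      (∀ p ∈ d.items, pvGA main p.1 = some p.2) →
      (l.foldl (pvStepA main) d).items.flatMap (fun p => pvWhileA box p.2.1 p.2.2) =
        d.items.flatMap (fun p => pvWhileA box p.2.1 p.2.2) ++
          (l.foldl (pvStepB main box (pvOccB main)) (seen, [])).2 := by
  intro l
  induction l with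
  | nil => intro d seen _ _ _ _; simp
  | cons sub rest ih =>
    intro d seen hl hnd hk hv
    have hlsub := hl sub List.mem_cons_self
    have hlrest := fun s hs => hl s (List.mem_cons_of_mem _ hs)
    simp only [List.foldl_cons]
    by_cases hseen : PySem.Set.contains seen sub = true
    · have hB : pvStepB main box (pvOccB main) (seen, ([] : List Int)) sub = (seen, []) := by
        unfold pvStepB; rw [if_pos hseen]
      rw [hB]
      rcases hg : pvGA main sub with _ | p
      · have hA : pvStepA main d sub = d := by
          have hg' : pvSearchA main sub (PySem.List.pyRange 0 ((main.length : Int) - (sub.length : Int) + 1)) = none := hg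
          unfold pvStepA; rw [hg']
        rw [hA]; exact ih d seen hlrest hnd hk hv
      · have hgG : pvGA main sub = some p := hg
        have hg' : pvSearchA main sub (PySem.List.pyRange 0 ((main.length : Int) - (sub.length : Int) + 1)) = some p := hg
        have hmem : sub ∈ seen := (PySem.Set.contains_iff _ _).mp hseen
        have hkeys : sub ∈ d.keys := by
          rw [hk]; exact List.mem_filter.mpr ⟨hmem, by simp [hgG]⟩
        have hcont : d.contains sub = true := (PySem.Dict.contains_iff_mem_keys d sub).mpr hkeys
        have hA : pvStepA main d sub = d := by
          unfold pvStepA; rw [hg']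
          apply PySem.Dict.ext
          rw [PySem.Dict.items_insert_of_contains d p hcont]
          conv_rhs => rw [← List.map_id d.items]
          apply List.map_congr_left
          intro q hq
          by_cases h2 : (q.1 == sub) = true
          · have hq1 : q.1 = sub := by simpa using h2
            have hv2 : pvGA main sub = some q.2 := by rw [← hq1]; exact hv q hq
            rw [hgG] at hv2
            have hq2 : q.2 = p := (Option.some_inj.mp hv2).symm
            simp only [h2, if_true, id_eq]
            obtain ⟨q1, q2⟩ := q
            simp only at hq1 hq2
            rw [hq1, hq2]
          · simp [h2]
        rw [hA]; exact ih d seen hlrest hnd hk hv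
    · have hadd : PySem.Set.add seen sub = seen ++ [sub] := by
        unfold PySem.Set.add; rw [if_neg hseen]
      have hnotk : sub ∉ d.keys := by
        rw [hk]; intro hmf
        exact hseen ((PySem.Set.contains_iff _ _).mpr (List.mem_of_mem_filter hmf))
      have hcont : d.contains sub = false := by
        rw [← Bool.not_eq_true]; intro hc
        exact hnotk ((PySem.Dict.contains_iff_mem_keys d sub).mp hc)
      cases sub with
      | nil =>
        have hg : pvGA main [] = some (0, -1) := by
          unfold pvGA
          rw [searchA_char]
          rw [show ((main.length : Int) - (([] : List Int).length : Int) + 1) = (main.length : Int) + 1 by simp]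
          rw [PySem.List.pyRange_one_cons (by omega : (0 : Int) < (main.length : Int) + 1)]
          rw [List.filter_cons_of_pos (sub_nil_matched main 0)]
          simp
        have hB : pvStepB main box (pvOccB main) (seen, ([] : List Int)) [] = (seen ++ [[]], []) := by
          unfold pvStepB; rw [if_neg hseen, hadd]
        have hA : pvStepA main d [] = d.insert [] (0, -1) := by
          unfold pvStepA
          have hg' : pvSearchA main [] (PySem.List.pyRange 0 ((main.length : Int) - (([] : List Int).length : Int) + 1)) = some (0, -1) := hg
          rw [hg']
        have hnd' : (d.insert [] ((0 : Int), (-1 : Int))).keys.Nodup := by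
          rw [PySem.Dict.keys_insert_of_not_contains d _ hcont]
          refine List.Nodup.append hnd (List.nodup_singleton _) ?_
          intro x hx hx2
          simp at hx2; subst hx2; exact hnotk hx
        have hk' : (d.insert [] ((0 : Int), (-1 : Int))).keys =
            (seen ++ [[]]).filter (fun s => (pvGA main s).isSome) := by
          rw [PySem.Dict.keys_insert_of_not_contains d _ hcont, hk, List.filter_append]
          simp [hg]
        have hv' : ∀ q ∈ (d.insert [] ((0 : Int), (-1 : Int))).items, pvGA main q.1 = some q.2 := by
          intro q hq
          rw [PySem.Dict.items_insert_of_not_contains d _ hcont] at hq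
          rcases List.mem_append.mp hq with h | h
          · exact hv q h
          · simp at h; subst h; simpa using hg
        rw [hA, hB]
        rw [ih (d.insert [] (0, -1)) (seen ++ [[]]) hlrest hnd' hk' hv']
        rw [PySem.Dict.items_insert_of_not_contains d _ hcont, List.flatMap_append]
        simp [whileA_stop box 0 (-1) (by norm_num)]
      | cons v tl =>
        have hB : pvStepB main box (pvOccB main) (seen, ([] : List Int)) (v :: tl) =
            (seen ++ [v :: tl], pvScanB main (v :: tl) box ((pvOccB main).getD v [])) := by
          unfold pvStepB; rw [if_neg hseen, hadd]; rfl
        have hscan : pvScanB main (v :: tl) box ((pvOccB main).getD v []) =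
            match ((PySem.List.pyRange 0 ((main.length : Int) - (((v :: tl).length : Nat) : Int) + 1)).filter
                (pvMatched main (v :: tl))).head? with
            | some i => PySem.List.slice box (some i) (some (i + ((v :: tl).length : Int) - 1))
            | none => [] := by
          rw [scanB_char, occ_getD, ← cand_eq]
        rcases hg : pvGA main (v :: tl) with _ | p
        · have hg2 : pvSearchA main (v :: tl) (PySem.List.pyRange 0 ((main.length : Int) - ((v :: tl).length : Int) + 1)) = none := hg
          rw [searchA_char] at hg2
          have hh := Option.map_eq_none_iff.mp hg2
          have hS : pvScanB main (v :: tl) box ((pvOccB main).getD v []) = [] := by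
            rw [hscan, hh]
          have hA : pvStepA main d (v :: tl) = d := by
            have hg' : pvSearchA main (v :: tl) (PySem.List.pyRange 0 ((main.length : Int) - ((v :: tl).length : Int) + 1)) = none := hg
            unfold pvStepA; rw [hg']
          have hgG : pvGA main (v :: tl) = none := hg
          have hk' : d.keys = (seen ++ [v :: tl]).filter (fun s => (pvGA main s).isSome) := by
            rw [hk, List.filter_append]; simp [hgG]
          rw [hA, hB, hS]
          exact ih d (seen ++ [v :: tl]) hlrest hnd hk' hv
        · have hgG : pvGA main (v :: tl) = some p := hg
          have hg2 : pvSearchA main (v :: tl) (PySem.List.pyRange 0 ((main.length : Int) - ((v :: tl).length : Int) + 1)) = some p := hg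
          have hg2' := hg2
          rw [searchA_char] at hg2
          rcases hhead : ((PySem.List.pyRange 0 ((main.length : Int) - (((v :: tl).length : Nat) : Int) + 1)).filter
              (pvMatched main (v :: tl))).head? with _ | i
          · rw [hhead] at hg2; simp at hg2
          rw [hhead] at hg2
          simp only [Option.map_some, Option.some_inj] at hg2
          obtain ⟨hmemL, hmatch, hmin⟩ :=
            head_filter_min (PySem.List.pairwise_lt_pyRange_one _ _) hhead
          obtain ⟨h0, h1⟩ := (PySem.List.mem_pyRange_one).mp hmemL
          obtain ⟨hlen, _⟩ := matched_facts main v tl h0 hmatch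
          -- the box bound from Pre_, when the subarray has length ≥ 2
          have hbound : 2 ≤ (v :: tl).length → i + ((v :: tl).length : Int) ≤ (box.length : Int) + 1 := by
            intro hm2
            have hi : ((i.toNat : Int)) = i := Int.toNat_of_nonneg h0
            have := hlsub hm2 i.toNat (by simp only [List.length_cons] at hlen ⊢; omega) ?_
            · rwa [hi] at this
            constructor
            · rw [hi]
              have := (beq_iff_eq).mp hmatch
              exact this
            · intro j hj habs
              have hjm : ((j : Int)) ∈ PySem.List.pyRange 0 ((main.length : Int) - (((v :: tl).length : Nat) : Int) + 1) := by
                rw [PySem.List.mem_pyRange_one]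
                constructor
                · omega
                · omega
              have := hmin (j : Int) hjm (by omega)
              rw [pvMatched, habs] at this
              simp at this
          have hS : pvScanB main (v :: tl) box ((pvOccB main).getD v []) =
              pvWhileA box i (i + ((v :: tl).length : Int) - 1) := by
            rw [hscan, hhead]
            show PySem.List.slice box (some i) (some (i + ((v :: tl).length : Int) - 1)) =
              pvWhileA box i (i + ((v :: tl).length : Int) - 1)
            by_cases hm1 : tl.length = 0
            · rw [whileA_stop box i (i + ((v :: tl).length : Int) - 1)
                (by simp only [List.length_cons, hm1]; omega)]
              rw [PySem.List.slice_toNat box h0 (by simp only [List.length_cons]; omega)]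
              simp only [List.length_cons, hm1]
              simp
            · exact (whileA_eq_slice box i (i + ((v :: tl).length : Int) - 1) h0
                (by simp only [List.length_cons]; omega)
                (by have := hbound (by simp only [List.length_cons]; omega); omega)).symm
          have hA : pvStepA main d (v :: tl) = d.insert (v :: tl) p := by
            unfold pvStepA; rw [hg2']
          have hnd' : (d.insert (v :: tl) p).keys.Nodup := by
            rw [PySem.Dict.keys_insert_of_not_contains d _ hcont]
            refine List.Nodup.append hnd (List.nodup_singleton _) ?_
            intro x hx hx2
            simp at hx2; subst hx2; exact hnotk hx
          have hk' : (d.insert (v :: tl) p).keys =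
              (seen ++ [v :: tl]).filter (fun s => (pvGA main s).isSome) := by
            rw [PySem.Dict.keys_insert_of_not_contains d _ hcont, hk, List.filter_append]
            simp [hg]
          have hv' : ∀ q ∈ (d.insert (v :: tl) p).items, pvGA main q.1 = some q.2 := by
            intro q hq
            rw [PySem.Dict.items_insert_of_not_contains d _ hcont] at hq
            rcases List.mem_append.mp hq with h | h
            · exact hv q h
            · simp at h; subst h; simpa using hgG
          rw [hA, hB, hS]
          rw [← List.append_nil (pvWhileA box i (i + ((v :: tl).length : Int) - 1))]
          rw [foldB_acc main box (pvOccB main) rest (seen ++ [v :: tl]) _ []]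
          rw [ih (d.insert (v :: tl) p) (seen ++ [v :: tl]) hlrest hnd' hk' hv']
          rw [PySem.Dict.items_insert_of_not_contains d _ hcont, List.flatMap_append]
          rw [← hg2]
          simp

-- ===== VERDICT (by name: the statement is the Claim_ definition above) =====
theorem find_subarrays_positions_spec : Claim_equal_find_subarrays_positions := by
  intro main subs box _hdom hpre
  unfold Spec_find_subarrays_positions find_subarrays_positions find_subarrays_positions_alt
  simp only []
  rw [PySem.List.foldl_append_eq_flatMap
    (fun p : List Int × Int × Int => pvWhileA box p.2.1 p.2.2)
    (List.foldl (pvStepA main) PySem.Dict.empty subs).items []]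
  have := fold_eq main box subs PySem.Dict.empty PySem.Set.empty hpre (by simp) (by rfl)
    (by intro q hq; simp [PySem.Dict.empty] at hq)
  simpa using this
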